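-- pv_equiv track=rewrite | github.com/Fernando-Jun-Saito-Marui/EP2-dp-ferias | transforma_base_certo.py | transforma_base
-- ===== SOURCE A (Python) =====
-- def transforma_base(questoes):
--     lista_questoes = {}
--
--     for q in questoes:
--         dificuldade = q["nivel"]
--
--         if dificuldade in lista_questoes:
--             lista_questoes[dificuldade].append(q)
--         else:
--             lista_questoes[dificuldade] = [q]
--
--     return lista_questoes
-- ===== SOURCE B (Python) =====
-- def transforma_base(questoes):
--     niveis = []
--     for q in questoes:
--         n = q["nivel"]
--         if n not in niveis:
--             niveis.append(n)
--     return {n: [q for q in questoes if q["nivel"] == n] for n in niveis}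
-- ===== Notes on version B (the rewrite author's own statement) =====
-- stated objective: alternative
-- what changed: Instead of bucketing each question into a growing dict in one scan, B first collects the distinct difficulty levels in first-appearance order and then builds each group by a filtering pass over the whole list.
import Mathlib
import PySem

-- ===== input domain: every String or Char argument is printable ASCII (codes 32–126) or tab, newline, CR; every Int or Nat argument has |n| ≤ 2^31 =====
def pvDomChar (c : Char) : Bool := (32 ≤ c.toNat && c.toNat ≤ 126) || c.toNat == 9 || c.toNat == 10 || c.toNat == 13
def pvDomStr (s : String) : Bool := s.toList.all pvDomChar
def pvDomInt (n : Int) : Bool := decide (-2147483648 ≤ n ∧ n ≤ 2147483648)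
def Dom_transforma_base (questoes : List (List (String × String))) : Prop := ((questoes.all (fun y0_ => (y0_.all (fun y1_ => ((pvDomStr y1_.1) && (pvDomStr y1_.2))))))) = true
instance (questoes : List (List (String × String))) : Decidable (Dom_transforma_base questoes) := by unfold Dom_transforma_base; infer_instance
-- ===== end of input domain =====

-- B replaces A's single-scan dict bucketing by a two-phase pass (collect distinct levels, then filter per level); same result, no speed claim.


-- ===== PORT A =====
-- q["nivel"] : first-match lookup in the question's association list (none = KeyError, excluded by Pre_)
def keyOf (q : List (String × String)) : Option String := (PySem.Dict.mk q).get? "nivel"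

def transforma_base (questoes : List (List (String × String))) : List (String × List (List (String × String))) :=
  (questoes.foldl (fun lista_questoes q =>
      match keyOf q with
      | none => lista_questoes   -- Python raises KeyError here; Pre_ excludes it
      | some dificuldade =>
        if lista_questoes.contains dificuldade then
          lista_questoes.modify dificuldade [] (fun l => l ++ [q])   -- lista_questoes[dificuldade].append(q)
        else
          lista_questoes.insert dificuldade [q])
    PySem.Dict.empty).items

-- ===== PORT B =====
def transforma_base_alt (questoes : List (List (String × String))) : List (String × List (List (String × String))) :=
  let niveis := questoes.foldl (fun ns q =>
      match keyOf q with
      | none => ns               -- Python raises KeyError here; Pre_ excludes it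
      | some n => if ns.contains n then ns else ns ++ [n]) ([] : List String)
  niveis.map (fun n => (n, questoes.filter (fun q => keyOf q == some n)))

-- ===== PRECONDITION & SPEC =====
-- Pre_ excludes questions without a "nivel" key, on which the Python A raises KeyError.
def Pre_transforma_base (questoes : List (List (String × String))) : Prop :=
  ∀ q ∈ questoes, "nivel" ∈ q.map Prod.fst
instance (questoes : List (List (String × String))) : Decidable (Pre_transforma_base questoes) := by
  unfold Pre_transforma_base; infer_instance

def pvWitness_transforma_base : (List (List (String × String))) :=
  [[("nivel", "1"), ("texto", "a")], [("nivel", "2")], [("nivel", "1"), ("texto", "b")]]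

def Spec_transforma_base (questoes : List (List (String × String))) (out : List (String × List (List (String × String)))) : Prop := out = transforma_base_alt questoes
instance (questoes : List (List (String × String))) (out : List (String × List (List (String × String)))) : Decidable (Spec_transforma_base questoes out) := by unfold Spec_transforma_base; infer_instance

-- ===== CLAIM (what is proved, stated in full; the proofs are below) =====
def Claim_equal_transforma_base : Prop := ∀ (questoes : List (List (String × String))), Dom_transforma_base questoes → Pre_transforma_base questoes → Spec_transforma_base questoes (transforma_base questoes)

-- ===== LEMMAS AND PROOFS =====

-- A's loop step and B's level-collecting step, named for the proofs
def pvAstep (d : PySem.Dict String (List (List (String × String)))) (q : List (String × String)) :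
    PySem.Dict String (List (List (String × String))) :=
  match keyOf q with
  | none => d
  | some dificuldade =>
    if d.contains dificuldade then d.modify dificuldade [] (fun l => l ++ [q])
    else d.insert dificuldade [q]

def pvNstep (ns : List String) (q : List (String × String)) : List String :=
  match keyOf q with
  | none => ns
  | some n => if ns.contains n then ns else ns ++ [n]

def pvNiv (xs : List (List (String × String))) : List String := xs.foldl pvNstep []

def pvGrp (xs : List (List (String × String))) (n : String) : List (List (String × String)) :=
  xs.filter (fun q => keyOf q == some n)

lemma pvA_eq (xs : List (List (String × String))) :
    transforma_base xs = (xs.foldl pvAstep PySem.Dict.empty).items := rfl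

lemma pvB_eq (xs : List (List (String × String))) :
    transforma_base_alt xs = (pvNiv xs).map (fun n => (n, pvGrp xs n)) := rfl

lemma pvNstep_eq_add (ns : List String) (q : List (String × String)) :
    pvNstep ns q = match keyOf q with
                   | none => ns
                   | some n => PySem.Set.add ns n := by
  cases hk : keyOf q <;> simp [pvNstep, PySem.Set.add, hk]

lemma pvNiv_eq_ofList (xs : List (List (String × String))) :
    pvNiv xs = PySem.Set.ofList (xs.filterMap keyOf) := by
  suffices h : ∀ (xs : List (List (String × String))) (acc : List String),
      xs.foldl pvNstep acc = (xs.filterMap keyOf).foldl PySem.Set.add acc by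
    simpa [pvNiv, PySem.Set.ofList, PySem.Set.empty] using h xs []
  intro xs
  induction xs with
  | nil => intro acc; rfl
  | cons q t ih =>
    intro acc
    cases hk : keyOf q <;> simp [List.foldl_cons, pvNstep_eq_add, hk, ih]

lemma pvMem_niv (xs : List (List (String × String))) (n : String) :
    n ∈ pvNiv xs ↔ ∃ q ∈ xs, keyOf q = some n := by
  rw [pvNiv_eq_ofList, PySem.Set.mem_ofList, List.mem_filterMap]

lemma pvNodup_niv (xs : List (List (String × String))) : (pvNiv xs).Nodup := by
  rw [pvNiv_eq_ofList]; exact PySem.Set.nodup_ofList _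

lemma pvGrp_nil_of_not_mem (xs : List (List (String × String))) (n : String)
    (h : n ∉ pvNiv xs) : pvGrp xs n = [] := by
  rw [pvGrp, List.filter_eq_nil_iff]
  intro q hq
  simp only [beq_iff_eq]
  intro hk
  exact h ((pvMem_niv xs n).mpr ⟨q, hq, hk⟩)

lemma pvMain (xs : List (List (String × String))) :
    (xs.foldl pvAstep PySem.Dict.empty).items = (pvNiv xs).map (fun n => (n, pvGrp xs n)) := by
  induction xs using List.reverseRecOn with
  | nil => rfl
  | append_singleton xs q ih =>
    have hD : xs.foldl pvAstep PySem.Dict.empty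
        = PySem.Dict.mk ((pvNiv xs).map (fun n => (n, pvGrp xs n))) := by
      cases hd : xs.foldl pvAstep PySem.Dict.empty with
      | mk items => simpa [hd] using ih
    have hkeys : (PySem.Dict.mk ((pvNiv xs).map (fun n => (n, pvGrp xs n)))).keys = pvNiv xs := by
      simp [PySem.Dict.keys_mk, Function.comp_def]
    have hnivapp : pvNiv (xs ++ [q]) = pvNstep (pvNiv xs) q := by
      simp [pvNiv, List.foldl_append]
    rw [List.foldl_append, List.foldl_cons, List.foldl_nil, hD]
    cases hk : keyOf q with
    | none =>
      have hgrp : ∀ n, pvGrp (xs ++ [q]) n = pvGrp xs n := by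
        intro n; simp [pvGrp, List.filter_append, hk]
      simp [pvAstep, hk, hnivapp, pvNstep, hgrp]
    | some n =>
      have hcont : (PySem.Dict.mk ((pvNiv xs).map (fun m => (m, pvGrp xs m)))).contains n
          = decide (n ∈ pvNiv xs) := by
        rw [PySem.Dict.contains_eq_decide_mem_keys, hkeys]
      by_cases hmem : n ∈ pvNiv xs
      · -- existing level: append q to its group, levels unchanged
        have hget : (PySem.Dict.mk ((pvNiv xs).map (fun m => (m, pvGrp xs m)))).get? n
            = some (pvGrp xs n) := by
          apply PySem.Dict.get?_of_mem_items
          · exact List.mem_map_of_mem hmem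
          · rw [hkeys]; exact pvNodup_niv xs
        have hniv' : pvNiv (xs ++ [q]) = pvNiv xs := by
          rw [hnivapp]; simp [pvNstep, hk, hmem]
        simp only [pvAstep, hk]
        rw [if_pos (show _ = true by rw [hcont]; simpa)]
        rw [PySem.Dict.modify, PySem.Dict.getD, hget, Option.getD_some,
          PySem.Dict.items_insert_of_contains _ _ (by rw [hcont]; simpa), hniv', List.map_map]
        apply List.map_congr_left
        intro m _
        by_cases hmn : m = n
        · subst hmn; simp [pvGrp, List.filter_append, hk]
        · have : (m == n) = false := by simpa using hmn
          simp [this, pvGrp, List.filter_append, hk, Function.comp,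
            beq_iff_eq, Ne.symm hmn]
      · -- new level: appended at the end with group [q]
        have hniv' : pvNiv (xs ++ [q]) = pvNiv xs ++ [n] := by
          rw [hnivapp]; simp [pvNstep, hk, hmem]
        simp only [pvAstep, hk]
        rw [if_neg (by rw [hcont]; simpa)]
        rw [PySem.Dict.items_insert_of_not_contains _ _ (by rw [hcont]; simpa), hniv',
          List.map_append]
        congr 1
        · apply List.map_congr_left
          intro m hm
          have hmn : m ≠ n := fun h => hmem (h ▸ hm)
          simp [pvGrp, List.filter_append, hk, beq_iff_eq, Ne.symm hmn]
        · have h1 : pvGrp (xs ++ [q]) n = pvGrp xs n ++ [q] := by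
            simp [pvGrp, List.filter_append, hk]
          simp [h1, pvGrp_nil_of_not_mem xs n hmem]

-- ===== VERDICT (by name: the statement is the Claim_ definition above) =====
theorem transforma_base_spec : Claim_equal_transforma_base := by
  intro questoes _ _
  unfold Spec_transforma_base
  rw [pvA_eq, pvB_eq, pvMain]
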